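-- pv_equiv track=rewrite | github.com/AlbertVeli/AdventOfCode | 2024/22/day22.py | find_best_sequence
-- ===== SOURCE A (Python) =====
-- from collections import defaultdict
--
-- def mix_and_prune(secret, value):
--     # mod = 16777216  # 2^24
--     and_mask = 0xFFFFFF  # 2^24 - 1
--
--     # Mix the value into the secret using XOR
--     secret ^= value
--     secret &= and_mask
--     return secret
--
-- def transform_secret(secret):
--
--     # Step 1: Multiply by 64
--     value1 = secret * 64
--     secret = mix_and_prune(secret, value1)
--
--     # Step 2: Divide by 32 and round down (integer division)
--     value2 = secret // 32
--     secret = mix_and_prune(secret, value2)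
--
--     # Step 3: Multiply by 2048
--     value3 = secret * 2048
--     secret = mix_and_prune(secret, value3)
--
--     return secret
--
-- def find_best_sequence(data, iterations = 2000):
--     sequence_profits = defaultdict(int)
--
--     # Iterate over each buyer's initial secret
--     for secret in data:
--         cur_sequence = []
--         prev_price = secret % 10
--         prev_sequences = set()
--
--         for i in range(iterations):
--             secret = transform_secret(secret)
--
--             price = secret % 10
--
--             # Calculate the change in price
--             delta = price - prev_price
--             cur_sequence.append(delta)
--
--             # Maintain the length of cur_sequence to 4
--             if len(cur_sequence) > 4:
--                 cur_sequence.pop(0)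
--
--             # Process sequences of length 4
--             if i >= 3:
--                 cur_tuple = tuple(cur_sequence)
--
--                 # Only add to profits if the sequence is new for this buyer
--                 if cur_tuple not in prev_sequences:
--                     sequence_profits[cur_tuple] += price
--                     prev_sequences.add(cur_tuple)
--
--             # Update the previous price
--             prev_price = price
--
--     # Find the sequence with the maximum profit
--     best_sequence = max(sequence_profits, key=sequence_profits.get)
--
--     # Retrieve the total bananas for the best sequence
--     max_profit = sequence_profits[best_sequence]
--
--     return best_sequence, max_profit
-- ===== SOURCE B (Python) =====
-- def mix_and_prune(secret, value):
--     and_mask = 0xFFFFFF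
--     secret ^= value
--     secret &= and_mask
--     return secret
--
--
-- def transform_secret(secret):
--     secret = mix_and_prune(secret, secret * 64)
--     secret = mix_and_prune(secret, secret // 32)
--     secret = mix_and_prune(secret, secret * 2048)
--     return secret
--
--
-- def find_best_sequence(data, iterations=2000):
--     # Three phases per buyer: materialize the price list, derive the delta
--     # list, then scan the 4-delta windows by start index.
--     profits = {}
--     for secret in data:
--         prices = [secret % 10]
--         s = secret
--         for _ in range(iterations):
--             s = transform_secret(s)
--             prices.append(s % 10)
--         deltas = [b - a for a, b in zip(prices, prices[1:])]
--         seen = set()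
--         for j in range(len(deltas) - 3):
--             window = tuple(deltas[j:j + 4])
--             if window not in seen:
--                 seen.add(window)
--                 profits[window] = profits.get(window, 0) + prices[j + 4]
--     best = max(profits, key=profits.get)
--     return best, profits[best]
-- ===== Notes on version B (the rewrite author's own statement) =====
-- stated objective: alternative
-- what changed: Replaces A's fused per-step loop (sliding cur_sequence via pop(0), interleaved dict updates) with a three-phase decomposition per buyer: materialize the full price list, derive the delta list, then scan 4-delta windows by start index crediting prices[j+4].
import Mathlib
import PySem

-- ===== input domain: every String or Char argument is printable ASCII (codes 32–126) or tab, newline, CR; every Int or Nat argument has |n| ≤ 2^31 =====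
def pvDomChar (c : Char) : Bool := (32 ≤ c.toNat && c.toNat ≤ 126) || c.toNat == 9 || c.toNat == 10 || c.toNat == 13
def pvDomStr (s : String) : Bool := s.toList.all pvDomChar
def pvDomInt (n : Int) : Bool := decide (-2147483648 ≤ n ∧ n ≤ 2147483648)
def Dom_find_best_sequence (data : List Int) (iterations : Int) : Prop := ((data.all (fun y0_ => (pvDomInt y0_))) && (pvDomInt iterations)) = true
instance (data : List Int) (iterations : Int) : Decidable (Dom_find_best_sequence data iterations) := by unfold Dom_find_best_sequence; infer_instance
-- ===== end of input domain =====

-- B replaces A's fused per-step loop (sliding window kept by append/pop(0), interleaved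
-- dict updates) by a three-phase decomposition per buyer (materialize the price list,
-- derive the delta list, scan 4-delta windows by start index); same return value on Pre_.

-- ===== PORT A =====
def mix_and_prune (secret value : Int) : Int :=
  PySem.Int.band (PySem.Int.bxor secret value) 0xFFFFFF

def transform_secret (secret : Int) : Int :=
  let s1 := mix_and_prune secret (secret * 64)
  let s2 := mix_and_prune s1 (PySem.Int.floordiv s1 32)
  mix_and_prune s2 (s2 * 2048)

-- body of A's inner 'for i in range(iterations)' loop; state (secret, cur_sequence, prev_price, prev_sequences, sequence_profits)
def aStep (st : Int × List Int × Int × PySem.Set (List Int) × PySem.Dict (List Int) Int)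
    (i : Int) : Int × List Int × Int × PySem.Set (List Int) × PySem.Dict (List Int) Int :=
  let (secret, cur, prev_price, seen, profits) := st
  let secret := transform_secret secret
  let price := PySem.Int.mod secret 10
  let delta := price - prev_price
  let cur := cur ++ [delta]
  let cur := if cur.length > 4 then cur.tail else cur    -- cur_sequence.pop(0)
  let (seen, profits) :=
    if i ≥ 3 then
      if cur ∈ seen then (seen, profits)
      else (PySem.Set.add seen cur, profits.modify cur 0 (· + price))   -- defaultdict +=
    else (seen, profits)
  (secret, cur, price, seen, profits)

-- one iteration of A's 'for secret in data' loop
def aBuyer (profits : PySem.Dict (List Int) Int) (secret : Int) (iterations : Int) :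
    PySem.Dict (List Int) Int :=
  ((PySem.List.pyRange 0 iterations 1).foldl aStep
    (secret, ([] : List Int), PySem.Int.mod secret 10,
      (PySem.Set.empty : PySem.Set (List Int)), profits)).2.2.2.2

def find_best_sequence (data : List Int) (iterations : Int) : List Int × Int :=
  let profits := data.foldl (fun profits secret => aBuyer profits secret iterations)
    PySem.Dict.empty
  -- max(sequence_profits, key=sequence_profits.get), then sequence_profits[best]:
  -- ported as the first value-maximal entry of d.items (same key order, each key paired
  -- with its value, so this is exact). Python raises ValueError on an empty dict —
  -- excluded by Pre_; the port returns ([], 0) there.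
  match PySem.List.max? profits.items (fun p => p.2) with
  | some best => (best.1, best.2)
  | none => ([], 0)

-- ===== PORT B =====
-- phase 1: 'for _ in range(iterations): s = transform_secret(s); prices.append(s % 10)'
def bPriceStep (sp : Int × List Int) (_ : Int) : Int × List Int :=
  let s := transform_secret sp.1
  (s, sp.2 ++ [PySem.Int.mod s 10])

-- phase 3 loop body: scan window j, credit prices[j+4] on first occurrence for this buyer
def bScanStep (prices deltas : List Int)
    (sp : PySem.Set (List Int) × PySem.Dict (List Int) Int) (j : Int) :
    PySem.Set (List Int) × PySem.Dict (List Int) Int :=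
  let window := PySem.List.slice deltas (some j) (some (j + 4))
  if window ∈ sp.1 then sp
  else (PySem.Set.add sp.1 window,
        sp.2.insert window (sp.2.getD window 0 + PySem.List.pyGetD prices (j + 4) 0))

-- one iteration of B's 'for secret in data' loop: three phases
def bBuyer (profits : PySem.Dict (List Int) Int) (secret : Int) (iterations : Int) :
    PySem.Dict (List Int) Int :=
  let prices := ((PySem.List.pyRange 0 iterations 1).foldl bPriceStep
    (secret, [PySem.Int.mod secret 10])).2
  let deltas := List.zipWith (fun a b => b - a) prices (prices.drop 1)
  ((PySem.List.pyRange 0 ((deltas.length : Int) - 3) 1).foldl (bScanStep prices deltas)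
    ((PySem.Set.empty : PySem.Set (List Int)), profits)).2

def find_best_sequence_alt (data : List Int) (iterations : Int) : List Int × Int :=
  let profits := data.foldl (fun profits secret => bBuyer profits secret iterations)
    PySem.Dict.empty
  -- max(profits, key=profits.get), then profits[best] — as in port A, the first
  -- value-maximal entry of profits.items (exact; ValueError case excluded by Pre_)
  match PySem.List.max? profits.items (fun p => p.2) with
  | some best => (best.1, best.2)
  | none => ([], 0)

-- ===== PRECONDITION & SPEC =====
-- Python A raises ValueError (max() of an empty dict) exactly when no 4-delta window
-- exists: empty data or iterations < 4; those inputs are excluded.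
def Pre_find_best_sequence (data : List Int) (iterations : Int) : Prop :=
  data ≠ [] ∧ 4 ≤ iterations
instance (data : List Int) (iterations : Int) : Decidable (Pre_find_best_sequence data iterations) := by
  unfold Pre_find_best_sequence; infer_instance
def pvWitness_find_best_sequence : List Int × Int := ([123], 4)

def Spec_find_best_sequence (data : List Int) (iterations : Int) (out : List Int × Int) : Prop := out = find_best_sequence_alt data iterations
instance (data : List Int) (iterations : Int) (out : List Int × Int) : Decidable (Spec_find_best_sequence data iterations out) := by unfold Spec_find_best_sequence; infer_instance

-- ===== CLAIM (what is proved, stated in full; the proofs are below) =====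
def Claim_equal_find_best_sequence : Prop := ∀ (data : List Int) (iterations : Int), Dom_find_best_sequence data iterations → Pre_find_best_sequence data iterations → Spec_find_best_sequence data iterations (find_best_sequence data iterations)

-- ===== LEMMAS AND PROOFS =====

-- secret after k transforms, the k-th price and delta
def pvSec (s0 : Int) (k : Nat) : Int := transform_secret^[k] s0
def pvP (s0 : Int) (k : Nat) : Int := PySem.Int.mod (pvSec s0 k) 10
def pvD (s0 : Int) (k : Nat) : Int := pvP s0 (k + 1) - pvP s0 k

-- the j-th window event: (the 4-delta window starting at j, the price credited)
def pvEv (s0 : Int) (j : Nat) : List Int × Int :=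
  ([pvD s0 j, pvD s0 (j + 1), pvD s0 (j + 2), pvD s0 (j + 3)], pvP s0 (j + 4))

-- first-occurrence crediting, common to both programs
def pvApply (sp : PySem.Set (List Int) × PySem.Dict (List Int) Int) (e : List Int × Int) :
    PySem.Set (List Int) × PySem.Dict (List Int) Int :=
  if e.1 ∈ sp.1 then sp
  else (PySem.Set.add sp.1 e.1, sp.2.insert e.1 (sp.2.getD e.1 0 + e.2))

-- A's cur_sequence after k loop iterations
def pvCur (s0 : Int) (k : Nat) : List Int := ((List.range k).map (pvD s0)).drop (k - 4)


theorem pvSec_succ (s0 : Int) (k : Nat) : pvSec s0 (k + 1) = transform_secret (pvSec s0 k) :=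
  Function.iterate_succ_apply' _ _ _

theorem pvModify (d : PySem.Dict (List Int) Int) (w : List Int) (p : Int) :
    d.modify w 0 (· + p) = d.insert w (d.getD w 0 + p) := by
  simp [PySem.Dict.modify, PySem.Dict.getD]

theorem pvCur_step (s0 : Int) (k : Nat) :
    (if (pvCur s0 k ++ [pvD s0 k]).length > 4 then (pvCur s0 k ++ [pvD s0 k]).tail
     else pvCur s0 k ++ [pvD s0 k]) = pvCur s0 (k + 1) := by
  by_cases hk : k ≤ 3
  · have h0 : k - 4 = 0 := by omega
    have h1 : k + 1 - 4 = 0 := by omega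
    rw [if_neg]
    · simp [pvCur, h0, h1, List.range_succ]
    · simp [pvCur, h0]; omega
  · have hlen : (pvCur s0 k).length = 4 := by simp [pvCur]; omega
    rw [if_pos (by simp [hlen])]
    unfold pvCur
    rw [← List.drop_append_of_le_length (by simp only [List.length_map, List.length_range]; omega),
      List.tail_drop,
      show (List.range k).map (pvD s0) ++ [pvD s0 k] = (List.range (k+1)).map (pvD s0) by
        simp [List.range_succ],
      show k + 1 - 4 = k - 4 + 1 by omega]

theorem pvWin (s0 : Int) (j k : Nat) (h : j + 4 ≤ k) :
    (((List.range k).map (pvD s0)).drop j).take 4 = (pvEv s0 j).1 := by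
  apply List.ext_getElem
  · simp [pvEv]; omega
  · intro i hi _
    simp only [List.getElem_take, List.getElem_drop, List.getElem_map, List.getElem_range]
    have hi4 : i < 4 := by simp at hi; omega
    interval_cases i <;> simp [pvEv]

theorem pvCur_win (s0 : Int) (k : Nat) (h : 3 ≤ k) :
    pvCur s0 (k + 1) = (pvEv s0 (k - 3)).1 := by
  have : pvCur s0 (k + 1) = (pvCur s0 (k + 1)).take 4 := by
    rw [List.take_of_length_le (by simp [pvCur]; omega)]
  rw [this, pvCur, show k + 1 - 4 = k - 3 by omega]
  exact pvWin s0 (k - 3) (k + 1) (by omega)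

theorem aLoop (s0 : Int) (prof : PySem.Dict (List Int) Int) (k : Nat) :
    (PySem.List.pyRange 0 (k : Int) 1).foldl aStep
      (s0, ([] : List Int), pvP s0 0, (PySem.Set.empty : PySem.Set (List Int)), prof)
    = (pvSec s0 k, pvCur s0 k, pvP s0 k,
       ((List.range (k - 3)).map (pvEv s0)).foldl pvApply
         ((PySem.Set.empty : PySem.Set (List Int)), prof)) := by
  induction k with
  | zero => simp [PySem.List.pyRange_one_eq_nil, pvSec, pvCur]
  | succ k ih =>
    rw [show ((k + 1 : Nat) : Int) = (k : Int) + 1 by push_cast; ring,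
      PySem.List.pyRange_one_succ_right (by positivity), List.foldl_append, ih]
    simp only [List.foldl_cons, List.foldl_nil]
    simp only [aStep]
    have hprice : PySem.Int.mod (transform_secret (pvSec s0 k)) 10 = pvP s0 (k + 1) := by
      rw [← pvSec_succ]; rfl
    have hdelta : pvP s0 (k + 1) - pvP s0 k = pvD s0 k := rfl
    rw [hprice, hdelta, pvCur_step, ← pvSec_succ]
    by_cases h3 : 3 ≤ k
    · rw [if_pos (by exact_mod_cast h3),
        show k + 1 - 3 = (k - 3) + 1 by omega, List.range_succ, List.map_append,
        List.foldl_append]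
      rw [pvCur_win s0 k h3]
      have h2 : (pvEv s0 (k - 3)).2 = pvP s0 (k + 1) := by
        simp only [pvEv]; rw [show k - 3 + 4 = k + 1 by omega]
      simp only [List.map_cons, List.map_nil, List.foldl_cons, List.foldl_nil, pvApply,
        pvModify, h2, Prod.mk.eta]
    · rw [if_neg (by exact_mod_cast h3)]
      rw [show k + 1 - 3 = k - 3 by omega]

theorem bPrices (s0 : Int) (k : Nat) :
    (PySem.List.pyRange 0 (k : Int) 1).foldl bPriceStep (s0, [pvP s0 0])
    = (pvSec s0 k, (List.range (k + 1)).map (pvP s0)) := by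
  induction k with
  | zero => simp [PySem.List.pyRange_one_eq_nil, pvSec]
  | succ k ih =>
    rw [show ((k + 1 : Nat) : Int) = (k : Int) + 1 by push_cast; ring,
      PySem.List.pyRange_one_succ_right (by positivity), List.foldl_append, ih]
    simp only [List.foldl_cons, List.foldl_nil, bPriceStep]
    rw [← pvSec_succ]
    rw [show (List.range (k + 1 + 1)).map (pvP s0)
        = (List.range (k + 1)).map (pvP s0) ++ [pvP s0 (k + 1)] by simp [List.range_succ]]
    rfl

theorem bDeltas (s0 : Int) (k : Nat) :
    List.zipWith (fun a b => b - a) ((List.range (k + 1)).map (pvP s0))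
      (((List.range (k + 1)).map (pvP s0)).drop 1) = (List.range k).map (pvD s0) := by
  apply List.ext_getElem
  · simp
  · intro i hi _
    simp only [List.getElem_zipWith, List.getElem_drop, List.getElem_map, List.getElem_range]
    rw [show 1 + i = i + 1 by omega]; rfl

theorem bScan (s0 : Int) (prof : PySem.Dict (List Int) Int) (k : Nat) :
    (PySem.List.pyRange 0 ((k : Int) - 3) 1).foldl
      (bScanStep ((List.range (k + 1)).map (pvP s0)) ((List.range k).map (pvD s0)))
      ((PySem.Set.empty : PySem.Set (List Int)), prof)
    = ((List.range (k - 3)).map (pvEv s0)).foldl pvApply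
        ((PySem.Set.empty : PySem.Set (List Int)), prof) := by
  rw [PySem.List.pyRange_one, show ((k : Int) - 3 - 0).toNat = k - 3 by omega,
    List.foldl_map, List.foldl_map]
  apply PySem.List.foldl_congr_mem
  intro acc j hj
  have hj' : j < k - 3 := List.mem_range.mp hj
  simp only [bScanStep, pvApply, zero_add]
  have hwin : PySem.List.slice ((List.range k).map (pvD s0)) (some (j : Int))
      (some ((j : Int) + 4)) = (pvEv s0 j).1 := by
    rw [show ((j : Int) + 4) = ((j + 4 : Nat) : Int) by push_cast; ring,
      PySem.List.slice_natCast, show j + 4 - j = 4 by omega]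
    exact pvWin s0 j k (by omega)
  have hp : PySem.List.pyGetD ((List.range (k + 1)).map (pvP s0)) ((j : Int) + 4) 0
      = (pvEv s0 j).2 := by
    rw [show ((j : Int) + 4) = ((j + 4 : Nat) : Int) by push_cast; ring,
      PySem.List.pyGetD_natCast, PySem.List.getD_map_range _ _ _ _ (by omega)]
    rfl
  rw [hwin, hp]

theorem pyRange_toNat (it : Int) :
    PySem.List.pyRange 0 it 1 = PySem.List.pyRange 0 (it.toNat : Int) 1 := by
  by_cases h : 0 ≤ it
  · rw [Int.toNat_of_nonneg h]
  · rw [PySem.List.pyRange_one_eq_nil (by omega),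
      PySem.List.pyRange_one_eq_nil (by omega)]

theorem buyer_eq (prof : PySem.Dict (List Int) Int) (s0 it : Int) :
    aBuyer prof s0 it = bBuyer prof s0 it := by
  unfold aBuyer bBuyer
  rw [pyRange_toNat]
  set n := it.toNat with hn
  have hP0 : PySem.Int.mod s0 10 = pvP s0 0 := rfl
  rw [hP0, aLoop, bPrices]
  dsimp only
  rw [bDeltas]
  simp only [List.length_map, List.length_range]
  rw [bScan]

-- ===== VERDICT (by name: the statement is the Claim_ definition above) =====
theorem find_best_sequence_spec : Claim_equal_find_best_sequence := by
  intro data it _ _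
  show find_best_sequence data it = find_best_sequence_alt data it
  have hd : data.foldl (fun profits secret => aBuyer profits secret it) PySem.Dict.empty
      = data.foldl (fun profits secret => bBuyer profits secret it) PySem.Dict.empty :=
    PySem.List.foldl_congr_mem _ _ _ _ (fun acc x _ => buyer_eq acc x it)
  simp only [find_best_sequence, find_best_sequence_alt, hd]
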